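-- pv_equiv track=rewrite | github.com/dgulyas/practice | tile.py | tallest
-- ===== SOURCE A (Python) =====
-- def tallest(grid, x, y, r):
-- 	t = y
-- 	good = True
-- 	while good:
-- 		for i in range(x,r+1):
-- 			if grid[i][t] != 0:
-- 				good = False
-- 		if good:
-- 			t = t + 1
-- 	return t-1
-- ===== SOURCE B (Python) =====
-- def tallest(grid, x, y, r):
-- 	best = None
-- 	for i in range(x, r + 1):
-- 		row = grid[i]
-- 		j = y
-- 		while j < len(row) and row[j] == 0:
-- 			j += 1
-- 		if j < len(row) and (best is None or j < best):
-- 			best = j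
-- 	return best - 1
-- ===== Notes on version B (the rewrite author's own statement) =====
-- stated objective: alternative
-- what changed: A's column-major while-loop (rescanning rows x..r for every column t from y) is replaced by a single row-major pass that computes each row's first nonzero column >= y and keeps a running minimum, returning min-1.
import Mathlib
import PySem

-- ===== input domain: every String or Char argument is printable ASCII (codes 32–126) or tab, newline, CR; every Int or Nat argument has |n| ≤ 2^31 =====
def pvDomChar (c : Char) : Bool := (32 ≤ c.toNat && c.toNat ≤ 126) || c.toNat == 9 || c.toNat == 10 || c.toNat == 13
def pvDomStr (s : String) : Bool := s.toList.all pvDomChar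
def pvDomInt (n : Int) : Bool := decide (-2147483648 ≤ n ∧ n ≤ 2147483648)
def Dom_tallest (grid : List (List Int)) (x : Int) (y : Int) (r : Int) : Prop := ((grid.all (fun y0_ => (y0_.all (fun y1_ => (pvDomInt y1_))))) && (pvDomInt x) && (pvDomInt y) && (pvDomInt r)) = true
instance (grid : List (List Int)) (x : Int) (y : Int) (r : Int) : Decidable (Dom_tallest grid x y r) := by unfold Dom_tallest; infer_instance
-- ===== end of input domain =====

-- B replaces A's column-major while-loop (rescan rows x..r per column) by one row-major pass
-- keeping a running minimum of each row's first nonzero column ≥ y; equality of RETURN values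
-- is proved on Pre_tallest (exactly the inputs where Python A returns instead of raising/looping).

-- ===== PORT A =====
-- grid[i][t] access (negative-index wraparound, none = IndexError)
def pvCell (grid : List (List Int)) (i j : Int) : Option Int :=
  (PySem.List.pyGet? grid i).bind (fun row => PySem.List.pyGet? row j)

-- fuel bound for A's while-loop: large enough for every terminating run (see Pre_)
def pvMaxLen (grid : List (List Int)) : Nat := (grid.map List.length).foldl max 0

-- inner 'for i in range(x, r+1): if grid[i][t] != 0: good = False'
def pvGood (grid : List (List Int)) (x r t : Int) : Bool :=
  (PySem.List.pyRange x (r+1) 1).foldl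
    (fun good i => if (pvCell grid i t).getD 0 ≠ 0 then false else good) true

-- the 'while good' loop on state t (fuel only makes it total; inside Pre_ it never runs out)
def pvLoopA (grid : List (List Int)) (x r : Int) : Nat → Int → Int
  | 0, t => t - 1
  | f+1, t => if pvGood grid x r t then pvLoopA grid x r f (t+1) else t - 1

def tallest (grid : List (List Int)) (x : Int) (y : Int) (r : Int) : Int :=
  pvLoopA grid x r (2 * pvMaxLen grid + 1) y

-- ===== PORT B =====
-- 'j = y; while j < len(row) and row[j] == 0: j += 1'
def pvFirstNZ (row : List Int) (j : Int) : Int :=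
  if h : j < (row.length : Int) ∧ PySem.List.pyGet? row j = some 0 then
    pvFirstNZ row (j+1)
  else j
termination_by ((row.length : Int) - j).toNat
decreasing_by omega

-- loop body: 'row = grid[i]; j = …; if j < len(row) and (best is None or j < best): best = j'
def pvStep (grid : List (List Int)) (y : Int) (best : Option Int) (i : Int) : Option Int :=
  match PySem.List.pyGet? grid i with
  | none => best
  | some row =>
    let j := pvFirstNZ row y
    if j < (row.length : Int) then
      match best with
      | none => some j
      | some b => if j < b then some j else some b
    else best

def tallest_alt (grid : List (List Int)) (x : Int) (y : Int) (r : Int) : Int :=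
  (((PySem.List.pyRange x (r+1) 1).foldl (pvStep grid y) none).getD 0) - 1

-- ===== PRECONDITION & SPEC =====
-- Pre_ = exactly the inputs where Python A returns: x ≤ r (else the while-loop never ends),
-- every row index in x..r readable (implied by the isSome clause; stated first so deciding
-- Pre_ is cheap), and
-- some column y+k where a row in x..r is nonzero, all rows in x..r readable up to that column
-- and all-zero strictly before it (otherwise A raises IndexError). k < 2·maxlen+1 always holds
-- for such a run, and bounds A's fuel.
def Pre_tallest (grid : List (List Int)) (x : Int) (y : Int) (r : Int) : Prop :=
  x ≤ r ∧ -(grid.length : Int) ≤ x ∧ r < (grid.length : Int) ∧ ∃ k : Nat, k < 2 * pvMaxLen grid + 1 ∧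
    (∀ i ∈ PySem.List.pyRange x (r+1) 1, ∀ k' : Nat, k' ≤ k → (pvCell grid i (y + (k':Int))).isSome) ∧
    (∃ i ∈ PySem.List.pyRange x (r+1) 1, ∃ v, pvCell grid i (y + (k:Int)) = some v ∧ v ≠ 0) ∧
    (∀ i ∈ PySem.List.pyRange x (r+1) 1, ∀ k' : Nat, k' < k → pvCell grid i (y + (k':Int)) = some 0)
instance (grid : List (List Int)) (x : Int) (y : Int) (r : Int) : Decidable (Pre_tallest grid x y r) := by
  unfold Pre_tallest; infer_instance

def pvWitness_tallest : List (List Int) × Int × Int × Int := ([[0, 1], [0, 1]], 0, 0, 1)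

def Spec_tallest (grid : List (List Int)) (x : Int) (y : Int) (r : Int) (out : Int) : Prop := out = tallest_alt grid x y r
instance (grid : List (List Int)) (x : Int) (y : Int) (r : Int) (out : Int) : Decidable (Spec_tallest grid x y r out) := by unfold Spec_tallest; infer_instance

-- ===== CLAIM (what is proved, stated in full; the proofs are below) =====
def Claim_equal_tallest : Prop := ∀ (grid : List (List Int)) (x : Int) (y : Int) (r : Int), Dom_tallest grid x y r → Pre_tallest grid x y r → Spec_tallest grid x y r (tallest grid x y r)

-- ===== LEMMAS AND PROOFS =====

lemma pv_foldl_flag (p : Int → Prop) [DecidablePred p] :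
    ∀ (l : List Int) (b : Bool),
      l.foldl (fun g i => if p i then false else g) b = (b && l.all (fun i => !decide (p i))) := by
  intro l
  induction l with
  | nil => intro b; simp
  | cons i t ih =>
    intro b
    by_cases hp : p i
    · simp only [List.foldl_cons, ih, List.all_cons, hp]
      simp
    · simp only [List.foldl_cons, ih, List.all_cons, hp]
      simp

lemma pvGood_iff (grid : List (List Int)) (x r t : Int) :
    pvGood grid x r t = true ↔
      ∀ i ∈ PySem.List.pyRange x (r+1) 1, (pvCell grid i t).getD 0 = 0 := by
  unfold pvGood
  rw [pv_foldl_flag (fun i => (pvCell grid i t).getD 0 ≠ 0)]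
  simp

lemma pvLoopA_stops (grid : List (List Int)) (x r : Int) :
    ∀ (k f : Nat) (t : Int), k < f →
      (∀ m : Nat, m < k → pvGood grid x r (t + (m:Int)) = true) →
      pvGood grid x r (t + (k:Int)) = false →
      pvLoopA grid x r f t = t + (k:Int) - 1 := by
  intro k
  induction k with
  | zero =>
    intro f t hf _ hstop
    obtain ⟨f', rfl⟩ : ∃ f', f = f' + 1 := ⟨f - 1, by omega⟩
    simp only [pvLoopA]
    simp only [Int.natCast_zero, add_zero] at hstop
    simp [hstop]
  | succ k ih =>
    intro f t hf hgood hstop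
    obtain ⟨f', rfl⟩ : ∃ f', f = f' + 1 := ⟨f - 1, by omega⟩
    have h0 : pvGood grid x r t = true := by
      have := hgood 0 (by omega); simpa using this
    simp only [pvLoopA, h0, if_true]
    have := ih f' (t+1) (by omega)
      (fun m hm => by
        have := hgood (m+1) (by omega)
        have e : t + 1 + (m:Int) = t + ((m:Int) + 1) := by ring
        rw [e]; simpa using this)
      (by
        have e : t + 1 + (k:Int) = t + ((k:Int) + 1) := by ring
        rw [e]; simpa using hstop)
    rw [this]; push_cast; ring

lemma pv_inRange_of_some {row : List Int} {j : Int} {v : Int}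
    (h : PySem.List.pyGet? row j = some v) : j < (row.length : Int) := by
  by_contra hge
  have : PySem.List.pyGet? row j = none := by
    rw [PySem.List.pyGet?_eq_none_iff]
    simp only [PySem.Raise.InRange]
    omega
  simp [this] at h

lemma pvFirstNZ_ge (row : List Int) : ∀ j : Int, j ≤ pvFirstNZ row j := by
  intro j
  fun_induction pvFirstNZ row j with
  | case1 j h ih => omega
  | case2 j h => omega

lemma pvFirstNZ_stop (row : List Int) (j v : Int)
    (h : PySem.List.pyGet? row j = some v) (hv : v ≠ 0) : pvFirstNZ row j = j := by
  rw [pvFirstNZ]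
  rw [dif_neg]
  rintro ⟨-, h0⟩
  rw [h] at h0
  exact hv (by simpa using h0)

lemma pvFirstNZ_skip (row : List Int) :
    ∀ (k : Nat) (j : Int),
      (∀ k' : Nat, k' < k → PySem.List.pyGet? row (j + (k':Int)) = some 0) →
      pvFirstNZ row j = pvFirstNZ row (j + (k:Int)) := by
  intro k
  induction k with
  | zero => intro j _; simp
  | succ k ih =>
    intro j hz
    have h0 : PySem.List.pyGet? row j = some 0 := by simpa using hz 0 (by omega)
    have hlt : j < (row.length : Int) := pv_inRange_of_some h0
    have step : pvFirstNZ row j = pvFirstNZ row (j+1) := by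
      rw [pvFirstNZ]; rw [dif_pos ⟨hlt, h0⟩]
    rw [step, ih (j+1) (fun k' hk' => by
      have := hz (k'+1) (by omega)
      have e : j + 1 + (k':Int) = j + ((k':Int) + 1) := by ring
      rw [e]; simpa using this)]
    congr 1; push_cast; ring

-- candidate of row index i in B's pass: its first nonzero column ≥ y, if any
def pvCand (grid : List (List Int)) (y i : Int) : Option Int :=
  (PySem.List.pyGet? grid i).bind (fun row =>
    if pvFirstNZ row y < (row.length : Int) then some (pvFirstNZ row y) else none)

lemma pvStep_cand_none {grid : List (List Int)} {y i : Int} (b : Option Int)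
    (h : pvCand grid y i = none) : pvStep grid y b i = b := by
  unfold pvCand at h
  cases hg : PySem.List.pyGet? grid i with
  | none => simp only [pvStep, hg]
  | some row =>
    rw [hg] at h
    simp only [Option.bind_some, ite_eq_right_iff, reduceCtorEq, imp_false, not_lt] at h
    simp only [pvStep, hg]
    rw [if_neg (not_lt.mpr h)]

lemma pvStep_cand_some {grid : List (List Int)} {y i j : Int} (b : Option Int)
    (h : pvCand grid y i = some j) :
    pvStep grid y b i = some (match b with | none => j | some bb => if j < bb then j else bb) := by
  unfold pvCand at h
  cases hg : PySem.List.pyGet? grid i with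
  | none => rw [hg] at h; exact absurd h (by simp)
  | some row =>
    rw [hg] at h
    simp only [Option.bind_some] at h
    by_cases hlt : pvFirstNZ row y < (row.length : Int)
    · rw [if_pos hlt] at h
      have hj : pvFirstNZ row y = j := by simpa using h
      simp only [pvStep, hg, hj]
      rw [if_pos (hj ▸ hlt)]
      cases b with
      | none => rfl
      | some bb => by_cases hb : j < bb <;> simp [hb]
    · rw [if_neg hlt] at h; exact absurd h (by simp)

lemma pv_fold_min (grid : List (List Int)) (y target : Int) :
    ∀ (l : List Int) (b : Option Int),
      (∀ i ∈ l, ∀ v, pvCand grid y i = some v → target ≤ v) →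
      (b = some target ∨
        ((∀ v, b = some v → target ≤ v) ∧ ∃ i ∈ l, pvCand grid y i = some target)) →
      l.foldl (pvStep grid y) b = some target := by
  intro l
  induction l with
  | nil =>
    intro b _ hb
    rcases hb with rfl | ⟨-, i, hi, -⟩
    · rfl
    · simp at hi
  | cons i t ih =>
    intro b hall hb
    simp only [List.foldl_cons]
    have hallt : ∀ i' ∈ t, ∀ v, pvCand grid y i' = some v → target ≤ v :=
      fun i' hi' => hall i' (List.mem_cons_of_mem _ hi')
    rcases hb with rfl | ⟨hbd, i', hi', hwit⟩
    · -- accumulator already the target: it stays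
      apply ih _ hallt
      left
      cases hc : pvCand grid y i with
      | none => exact pvStep_cand_none _ hc
      | some j =>
        have hj : target ≤ j := hall i (List.mem_cons_self) j hc
        rw [pvStep_cand_some _ hc]
        simp only []
        have : ¬ j < target := by omega
        simp [this]
    · rcases List.mem_cons.mp hi' with rfl | hi't
      · -- the head is a witness: accumulator becomes the target
        apply ih _ hallt
        left
        rw [pvStep_cand_some _ hwit]
        cases b with
        | none => rfl
        | some bb =>
          have hbb : target ≤ bb := hbd bb rfl
          simp only []
          by_cases h : target < bb
          · simp [h]
          · have : bb = target := by omega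
            simp [this]
      · -- witness further on: accumulator keeps its lower bound
        apply ih _ hallt
        right
        refine ⟨?_, i', hi't, hwit⟩
        intro v hv
        cases hc : pvCand grid y i with
        | none => rw [pvStep_cand_none _ hc] at hv; exact hbd v hv
        | some j =>
          have hj : target ≤ j := hall i (List.mem_cons_self) j hc
          rw [pvStep_cand_some _ hc] at hv
          cases b with
          | none => simp at hv; omega
          | some bb =>
            have hbb : target ≤ bb := hbd bb rfl
            simp only [] at hv
            split at hv <;> (simp at hv; omega)

-- ===== VERDICT (by name: the statement is the Claim_ definition above) =====
theorem tallest_spec : Claim_equal_tallest := by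
  intro grid x y r _ hpre
  obtain ⟨hxr, -, -, k, hk, hsome, ⟨i0, hi0, v, hv, hvne⟩, hzero⟩ := hpre
  -- the witness row i0 : grid[i0] exists
  obtain ⟨row0, hrow0, hv0⟩ : ∃ row0, PySem.List.pyGet? grid i0 = some row0 ∧
      PySem.List.pyGet? row0 (y + (k:Int)) = some v := by
    unfold pvCell at hv
    cases hg : PySem.List.pyGet? grid i0 with
    | none => rw [hg] at hv; simp at hv
    | some row0 => rw [hg] at hv; exact ⟨row0, rfl, by simpa using hv⟩
  -- A's side: the loop stops after exactly k increments
  have hA : tallest grid x y r = y + (k:Int) - 1 := by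
    unfold tallest
    apply pvLoopA_stops grid x r k _ y hk
    · intro m hm
      rw [pvGood_iff]
      intro i hi
      rw [hzero i hi m hm]
      rfl
    · rw [Bool.eq_false_iff]
      intro hgood
      rw [pvGood_iff] at hgood
      have := hgood i0 hi0
      rw [hv] at this
      exact hvne this
  -- B's side: the running minimum ends at y + k
  have hcand0 : pvCand grid y i0 = some (y + (k:Int)) := by
    unfold pvCand
    rw [hrow0]
    simp only [Option.bind_some]
    have hskip : pvFirstNZ row0 y = pvFirstNZ row0 (y + (k:Int)) := by
      apply pvFirstNZ_skip
      intro k' hk'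
      have := hzero i0 hi0 k' (by omega)
      unfold pvCell at this
      rw [hrow0] at this
      simpa using this
    have hstop : pvFirstNZ row0 (y + (k:Int)) = y + (k:Int) :=
      pvFirstNZ_stop _ _ _ hv0 hvne
    rw [hskip, hstop, if_pos (pv_inRange_of_some hv0)]
  have hlow : ∀ i ∈ PySem.List.pyRange x (r+1) 1, ∀ w, pvCand grid y i = some w →
      y + (k:Int) ≤ w := by
    intro i hi w hw
    unfold pvCand at hw
    cases hg : PySem.List.pyGet? grid i with
    | none => rw [hg] at hw; simp at hw
    | some row =>
      rw [hg] at hw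
      simp only [Option.bind_some] at hw
      have hskip : pvFirstNZ row y = pvFirstNZ row (y + (k:Int)) := by
        apply pvFirstNZ_skip
        intro k' hk'
        have := hzero i hi k' hk'
        unfold pvCell at this
        rw [hg] at this
        simpa using this
      by_cases hlt : pvFirstNZ row y < (row.length : Int)
      · rw [if_pos hlt] at hw
        have hw' : pvFirstNZ row y = w := by simpa using hw
        have := pvFirstNZ_ge row (y + (k:Int))
        omega
      · rw [if_neg hlt] at hw; simp at hw
  have hB : tallest_alt grid x y r = y + (k:Int) - 1 := by
    unfold tallest_alt
    rw [pv_fold_min grid y (y + (k:Int)) _ none hlow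
      (Or.inr ⟨by simp, i0, hi0, hcand0⟩)]
    rfl
  show _ = _
  rw [hA, hB]
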